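-- pv_equiv track=rewrite | github.com/njugunanduati/meta_coding_puzzles | cafeteria.py | getMaxAdditionalDinersCount
-- ===== SOURCE A (Python) =====
-- from typing import List
--
-- def getMaxAdditionalDinersCount(N: int, K: int, M: int, S: List[int]) -> int:
--     # Write your code here
--     result =  0
--     S.sort()
--     left = 1
--     for s in S:
--         right = s - (K + 1)
--         result += 1 + (right - left) // (K + 1)
--         left = s + (K + 1)
--     result += 1 + (N - left) // (K + 1)
--     return result
-- ===== SOURCE B (Python) =====
-- from typing import List
--
--
-- def _gaps(lst, d):
--     # capacity of the free seats strictly between lst[0] and lst[-1] (len(lst) >= 2),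
--     # by divide and conquer on the sorted occupied seats
--     if len(lst) == 2:
--         return (lst[1] - lst[0]) // d - 1
--     m = len(lst) // 2
--     return _gaps(lst[:m + 1], d) + _gaps(lst[m:], d)
--
--
-- def getMaxAdditionalDinersCount(N: int, K: int, M: int, S: List[int]) -> int:
--     S.sort()
--     d = K + 1
--     if not S:
--         return (N + K) // d
--     total = (S[0] - 1) // d + (N - S[-1]) // d
--     if len(S) >= 2:
--         total += _gaps(S, d)
--     return total
-- ===== Notes on version B (the rewrite author's own statement) =====
-- stated objective: alternative
-- what changed: Replaces A's single scan threading a running 'left' boundary with an explicit closed form for the empty row, separate head/tail edge formulas ((s0-1)//d and (N-slast)//d), and a divide-and-conquer recursion over halves of the sorted seat list for the interior gap capacities.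
import Mathlib
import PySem

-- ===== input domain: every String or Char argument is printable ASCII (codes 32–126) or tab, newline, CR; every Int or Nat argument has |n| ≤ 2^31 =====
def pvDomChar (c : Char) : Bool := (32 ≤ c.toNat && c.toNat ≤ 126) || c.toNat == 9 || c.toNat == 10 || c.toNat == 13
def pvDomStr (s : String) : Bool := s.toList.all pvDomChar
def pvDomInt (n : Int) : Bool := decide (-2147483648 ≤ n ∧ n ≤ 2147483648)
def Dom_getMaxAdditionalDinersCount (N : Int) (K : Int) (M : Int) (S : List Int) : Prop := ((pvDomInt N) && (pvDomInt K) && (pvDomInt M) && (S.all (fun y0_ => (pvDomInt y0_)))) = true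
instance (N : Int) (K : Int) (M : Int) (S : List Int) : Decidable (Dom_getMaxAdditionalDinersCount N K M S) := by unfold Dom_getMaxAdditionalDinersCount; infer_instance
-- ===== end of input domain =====

-- B replaces A's running-boundary scan with an explicit empty-row closed form, separate
-- edge formulas, and a divide-and-conquer recursion over the sorted seats for the interior
-- gaps (objective: alternative). Both A and B sort S in place; the equivalence proved here
-- is about the return value only.

-- ===== PORT A =====
def getMaxAdditionalDinersCount (N : Int) (K : Int) (M : Int) (S : List Int) : Int :=
  -- result = 0; S.sort(); left = 1; loop threading (result, left); then the tail term
  let S' := PySem.List.sorted S (fun x => x) false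
  let st := S'.foldl
    (fun (st : Int × Int) s =>
      (st.1 + (1 + PySem.Int.floordiv ((s - (K + 1)) - st.2) (K + 1)), s + (K + 1)))
    (0, 1)
  st.1 + (1 + PySem.Int.floordiv (N - st.2) (K + 1))

-- ===== PORT B =====
-- _gaps(lst, d): divide-and-conquer; Python is only ever called with len(lst) >= 2, the
-- len < 2 guard returns 0 at that unreachable point (Python would recurse forever there).
-- lst[:m+1] / lst[m:] with 0 ≤ m are exactly List.take (m+1) / List.drop m.
-- structural recursion on a fuel bounded by the list length (each half is strictly
-- shorter, so lst.length steps always suffice; the fuel only makes the recursion total)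
def pvGapsFuel (d : Int) : Nat → List Int → Int
  | 0, _ => 0
  | fuel + 1, lst =>
    if lst.length < 2 then 0
    else if lst.length = 2 then
      PySem.Int.floordiv ((PySem.List.pyGet? lst 1).getD 0 - (PySem.List.pyGet? lst 0).getD 0) d - 1
    else
      let m := lst.length / 2
      pvGapsFuel d fuel (lst.take (m + 1)) + pvGapsFuel d fuel (lst.drop m)

def pvGaps (d : Int) (lst : List Int) : Int := pvGapsFuel d lst.length lst

def getMaxAdditionalDinersCount_alt (N : Int) (K : Int) (M : Int) (S : List Int) : Int :=
  let S' := PySem.List.sorted S (fun x => x) false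
  let d := K + 1
  if S'.length = 0 then PySem.Int.floordiv (N + K) d
  else
    let total := PySem.Int.floordiv ((PySem.List.pyGet? S' 0).getD 0 - 1) d
               + PySem.Int.floordiv (N - (PySem.List.pyGet? S' (-1)).getD 0) d
    if 2 ≤ S'.length then total + pvGaps d S' else total

-- ===== PRECONDITION & SPEC =====
-- Pre_ excludes only K = -1, on which Python's '// (K + 1)' raises ZeroDivisionError (in A and in B alike).
def Pre_getMaxAdditionalDinersCount (N : Int) (K : Int) (M : Int) (S : List Int) : Prop := K + 1 ≠ 0
instance (N : Int) (K : Int) (M : Int) (S : List Int) : Decidable (Pre_getMaxAdditionalDinersCount N K M S) := by unfold Pre_getMaxAdditionalDinersCount; infer_instance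
def pvWitness_getMaxAdditionalDinersCount : Int × Int × Int × List Int := (10, 1, 1, [2, 6])
def Spec_getMaxAdditionalDinersCount (N : Int) (K : Int) (M : Int) (S : List Int) (out : Int) : Prop := out = getMaxAdditionalDinersCount_alt N K M S
instance (N : Int) (K : Int) (M : Int) (S : List Int) (out : Int) : Decidable (Spec_getMaxAdditionalDinersCount N K M S out) := by unfold Spec_getMaxAdditionalDinersCount; infer_instance

-- ===== CLAIM (what is proved, stated in full; the proofs are below) =====
def Claim_equal_getMaxAdditionalDinersCount : Prop := ∀ (N : Int) (K : Int) (M : Int) (S : List Int), Dom_getMaxAdditionalDinersCount N K M S → Pre_getMaxAdditionalDinersCount N K M S → Spec_getMaxAdditionalDinersCount N K M S (getMaxAdditionalDinersCount N K M S)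

-- ===== LEMMAS AND PROOFS =====

-- sum of g over consecutive pairs of a list
def pairSumF (g : Int → Int → Int) : List Int → Int
  | a :: b :: t => g a b + pairSumF g (b :: t)
  | _ => 0

-- floor-division shift: (a + k*d) // d = a // d + k
theorem fd_shift (a k d : Int) (hd : d ≠ 0) :
    PySem.Int.floordiv (a + k * d) d = PySem.Int.floordiv a d + k := by
  simp only [PySem.Int.floordiv]
  exact Int.add_mul_fdiv_right a k hd

-- shift the accumulator of a summing foldl out front
theorem foldl_add_shift (g : Int × Int → Int) (ps : List (Int × Int)) (a : Int) :
    ps.foldl (fun acc p => acc + g p) a = a + ps.foldl (fun acc p => acc + g p) 0 := by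
  induction ps generalizing a with
  | nil => simp
  | cons p ps ih =>
    simp only [List.foldl_cons]
    rw [ih (a + g p), ih (0 + g p)]; ring

-- loop invariant: A's fold started at (r, l) plus its tail term equals r plus the
-- pairwise sum over the walls (l - (K+1)) :: xs ++ [N + K + 1]
theorem loop_eq (N K : Int) (xs : List Int) (r l : Int) :
    (xs.foldl
        (fun (st : Int × Int) s =>
          (st.1 + (1 + PySem.Int.floordiv ((s - (K + 1)) - st.2) (K + 1)), s + (K + 1)))
        (r, l)).1
      + (1 + PySem.Int.floordiv (N -
        (xs.foldl
        (fun (st : Int × Int) s =>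
          (st.1 + (1 + PySem.Int.floordiv ((s - (K + 1)) - st.2) (K + 1)), s + (K + 1)))
        (r, l)).2) (K + 1))
    = r + (List.zip ((l - (K + 1)) :: xs ++ [N + K + 1]) ((xs ++ [N + K + 1]))).foldl
        (fun acc (p : Int × Int) =>
          acc + (1 + PySem.Int.floordiv (p.2 - p.1 - 2 * (K + 1)) (K + 1))) 0 := by
  induction xs generalizing r l with
  | nil =>
    simp [List.zip, List.zipWith]
    have h : N + K + 1 - (l - (K + 1)) - 2 * (K + 1) = N - l := by ring
    rw [h]
  | cons s xs ih =>
    simp only [List.cons_append, List.zip_cons_cons, List.foldl_cons]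
    rw [foldl_add_shift _ _ (0 + (1 + PySem.Int.floordiv (s - (l - (K + 1)) - 2 * (K + 1)) (K + 1)))]
    have h1 : s - (l - (K + 1)) - 2 * (K + 1) = (s - (K + 1)) - l := by ring
    rw [h1]
    have h2 := ih (r + (1 + PySem.Int.floordiv ((s - (K + 1)) - l) (K + 1))) (s + (K + 1))
    have h3 : s + (K + 1) - (K + 1) = s := by ring
    rw [h3] at h2
    rw [h2]
    ring_nf
    rfl

-- the fold over adjacent zipped pairs is pairSumF
theorem zipfold_eq_pairSumF (g : Int → Int → Int) (l : List Int) :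
    (List.zip l (l.drop 1)).foldl (fun acc p => acc + g p.1 p.2) 0 = pairSumF g l := by
  induction l with
  | nil => simp [pairSumF]
  | cons a l ih =>
    cases l with
    | nil => simp [pairSumF]
    | cons b t =>
      simp only [List.drop_succ_cons, List.drop_zero, List.zip_cons_cons, List.foldl_cons]
      rw [foldl_add_shift (fun p => g p.1 p.2)]
      simp only [List.drop_succ_cons, List.drop_zero] at ih
      rw [ih]
      simp [pairSumF]

theorem pairSumF_congr (g g' : Int → Int → Int) (h : ∀ a b, g a b = g' a b) (l : List Int) :
    pairSumF g l = pairSumF g' l := by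
  induction l with
  | nil => rfl
  | cons a l ih =>
    cases l with
    | nil => rfl
    | cons b t =>
      simp only [pairSumF, h]
      rw [ih]

-- splice a pair sum at a shared element
theorem pairSumF_splice (g : Int → Int → Int) (xs : List Int) (x : Int) (ys : List Int)
    (hxs : xs ≠ []) :
    pairSumF g (xs ++ [x]) + pairSumF g (x :: ys) = pairSumF g (xs ++ x :: ys) := by
  induction xs with
  | nil => exact absurd rfl hxs
  | cons a xs ih =>
    cases xs with
    | nil => simp [pairSumF]
    | cons b t =>
      simp only [List.cons_append, pairSumF]
      have := ih (by simp)
      simp only [List.cons_append] at this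
      omega

theorem pairSumF_snoc (g : Int → Int → Int) (xs : List Int) (y : Int) (hxs : xs ≠ []) :
    pairSumF g (xs ++ [y]) = pairSumF g xs + g (xs.getLast hxs) y := by
  induction xs with
  | nil => exact absurd rfl hxs
  | cons a xs ih =>
    cases xs with
    | nil => simp [pairSumF]
    | cons b t =>
      simp only [List.cons_append, pairSumF]
      have := ih (by simp)
      simp only [List.cons_append] at this
      rw [this, show (a :: b :: t).getLast hxs = (b :: t).getLast (by simp) from
        List.getLast_cons (by simp)]
      ring

-- the divide-and-conquer helper computes the pairwise sum
theorem pvGapsFuel_eq (d : Int) : ∀ (fuel : Nat) (lst : List Int), lst.length ≤ fuel → 2 ≤ lst.length →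
    pvGapsFuel d fuel lst = pairSumF (fun a b => PySem.Int.floordiv (b - a) d - 1) lst := by
  intro fuel
  induction fuel with
  | zero => intro lst h1 h2; omega
  | succ n ih =>
    intro lst h1 h2
    by_cases h2' : lst.length = 2
    · obtain ⟨a, b, hab⟩ : ∃ a b, lst = [a, b] := by
        match lst, h2' with
        | [a, b], _ => exact ⟨a, b, rfl⟩
      subst hab
      rw [pvGapsFuel]
      simp [pairSumF, PySem.List.pyGet?, PySem.List.pyIdx?]
    · have h3 : 3 ≤ lst.length := by omega
      rw [pvGapsFuel]
      have hm : lst.length / 2 < lst.length := by omega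
      simp only [if_neg (by omega : ¬ lst.length < 2), if_neg h2']
      set m := lst.length / 2 with hmdef
      have hm1 : 1 ≤ m := by omega
      have hmlt : m + 1 < lst.length := by omega
      have htake : lst.take (m + 1) = lst.take m ++ [lst[m]] := by
        rw [List.take_add_one]
        simp [List.getElem?_eq_getElem hm]
      have hdrop : lst.drop m = lst[m] :: lst.drop (m + 1) := List.drop_eq_getElem_cons hm
      have hlt : (lst.take (m + 1)).length ≤ n := by simp; omega
      have hlt2 : 2 ≤ (lst.take (m + 1)).length := by simp; omega
      have hdt : (lst.drop m).length ≤ n := by simp; omega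
      have hdt2 : 2 ≤ (lst.drop m).length := by simp; omega
      rw [ih (lst.take (m + 1)) hlt hlt2, ih (lst.drop m) hdt hdt2]
      rw [htake, hdrop]
      rw [pairSumF_splice _ _ _ _ (by
        apply List.ne_nil_of_length_pos
        simp only [List.length_take]
        omega)]
      congr 1
      conv_rhs => rw [← List.take_append_drop m lst, hdrop]

theorem pvGaps_eq (d : Int) (lst : List Int) (h2 : 2 ≤ lst.length) :
    pvGaps d lst = pairSumF (fun a b => PySem.Int.floordiv (b - a) d - 1) lst :=
  pvGapsFuel_eq d lst.length lst le_rfl h2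

-- negative index -1 on a nonempty list is getLast
theorem pyGet_neg_one (l : List Int) (h : l ≠ []) :
    (PySem.List.pyGet? l (-1)).getD 0 = l.getLast h := by
  have hl : 0 < l.length := List.length_pos_iff.mpr h
  simp only [PySem.List.pyGet?, PySem.List.pyIdx?]
  norm_num
  rw [if_pos (by omega : 1 ≤ l.length)]
  rw [List.getLast_eq_getElem]
  simp [List.getElem?_eq_getElem (show l.length - 1 < l.length by omega)]

-- the core identity over an arbitrary list l (sortedness is not needed: both sides are
-- the same algebraic sum over consecutive elements of l)
theorem core_eq (N K : Int) (hd : K + 1 ≠ 0) (l : List Int) :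
    (l.foldl
        (fun (st : Int × Int) s =>
          (st.1 + (1 + PySem.Int.floordiv ((s - (K + 1)) - st.2) (K + 1)), s + (K + 1)))
        (0, 1)).1
      + (1 + PySem.Int.floordiv (N -
        (l.foldl
        (fun (st : Int × Int) s =>
          (st.1 + (1 + PySem.Int.floordiv ((s - (K + 1)) - st.2) (K + 1)), s + (K + 1)))
        (0, 1)).2) (K + 1))
    = if l.length = 0 then PySem.Int.floordiv (N + K) (K + 1)
      else
        (if 2 ≤ l.length then
          (PySem.Int.floordiv ((PySem.List.pyGet? l 0).getD 0 - 1) (K + 1)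
            + PySem.Int.floordiv (N - (PySem.List.pyGet? l (-1)).getD 0) (K + 1)) + pvGaps (K + 1) l
        else
          PySem.Int.floordiv ((PySem.List.pyGet? l 0).getD 0 - 1) (K + 1)
            + PySem.Int.floordiv (N - (PySem.List.pyGet? l (-1)).getD 0) (K + 1)) := by
  have hA := loop_eq N K l 0 1
  have hw : (1 : Int) - (K + 1) = -K := by ring
  rw [hw] at hA
  rw [hA]
  have hzip : ((-K) :: l ++ [N + K + 1]).drop 1 = l ++ [N + K + 1] := by simp
  rw [show l ++ [N + K + 1] = ((-K) :: l ++ [N + K + 1]).drop 1 from hzip.symm]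
  rw [zipfold_eq_pairSumF (fun a b => 1 + PySem.Int.floordiv (b - a - 2 * (K + 1)) (K + 1))]
  rw [pairSumF_congr (fun a b => 1 + PySem.Int.floordiv (b - a - 2 * (K + 1)) (K + 1))
        (fun a b => PySem.Int.floordiv (b - a) (K + 1) - 1)
        (by
          intro a b
          show 1 + PySem.Int.floordiv (b - a - 2 * (K + 1)) (K + 1)
              = PySem.Int.floordiv (b - a) (K + 1) - 1
          have h : b - a - 2 * (K + 1) = (b - a) + (-2) * (K + 1) := by ring
          rw [h, fd_shift _ _ _ hd]
          ring)]
  cases l with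
  | nil =>
    rw [if_pos (show ([] : List Int).length = 0 from rfl)]
    show 0 + (PySem.Int.floordiv (N + K + 1 - -K) (K + 1) - 1 + 0) = _
    have h : N + K + 1 - -K = (N + K) + 1 * (K + 1) := by ring
    rw [h, fd_shift _ _ _ hd]
    ring
  | cons s rest =>
    rw [if_neg (by simp)]
    have hhead : (PySem.List.pyGet? (s :: rest) 0).getD 0 = s := by
      simp [PySem.List.pyGet?, PySem.List.pyIdx?]
    rw [hhead, pyGet_neg_one (s :: rest) (by simp)]
    have hleft : pairSumF (fun a b => PySem.Int.floordiv (b - a) (K + 1) - 1)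
        ((-K) :: (s :: rest) ++ [N + K + 1])
        = (PySem.Int.floordiv (s - -K) (K + 1) - 1)
          + pairSumF (fun a b => PySem.Int.floordiv (b - a) (K + 1) - 1) ((s :: rest) ++ [N + K + 1]) := by
      simp [pairSumF]
    rw [zero_add, hleft]
    rw [pairSumF_snoc _ (s :: rest) (N + K + 1) (by simp)]
    have he1 : PySem.Int.floordiv (s - -K) (K + 1) - 1 = PySem.Int.floordiv (s - 1) (K + 1) := by
      have h : s - -K = (s - 1) + 1 * (K + 1) := by ring
      rw [h, fd_shift _ _ _ hd]; ring
    have he2 : PySem.Int.floordiv (N + K + 1 - (s :: rest).getLast (by simp)) (K + 1) - 1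
        = PySem.Int.floordiv (N - (s :: rest).getLast (by simp)) (K + 1) := by
      have h : N + K + 1 - (s :: rest).getLast (by simp)
          = (N - (s :: rest).getLast (by simp)) + 1 * (K + 1) := by ring
      rw [h, fd_shift _ _ _ hd]
      ring
    rw [he1, he2]
    cases rest with
    | nil =>
      rw [if_neg (by simp)]
      simp [pairSumF]
    | cons b t =>
      rw [if_pos (by simp)]
      rw [pvGaps_eq (K + 1) (s :: b :: t) (by simp)]
      ring

-- ===== VERDICT (by name: the statement is the Claim_ definition above) =====
theorem getMaxAdditionalDinersCount_spec : Claim_equal_getMaxAdditionalDinersCount := by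
  intro N K M S _ hpre
  show getMaxAdditionalDinersCount N K M S = getMaxAdditionalDinersCount_alt N K M S
  have hd : K + 1 ≠ 0 := hpre
  unfold getMaxAdditionalDinersCount getMaxAdditionalDinersCount_alt
  have h := core_eq N K hd (PySem.List.sorted S (fun x => x) false)
  simp only at h ⊢
  rw [h]
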